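-- pv_equiv track=rewrite | github.com/noah-yared/chess | chess.py | check_move
-- ===== SOURCE A (Python) =====
-- def squares_between(loc1, loc2):
--     x1, y1 = loc1; x2, y2 = loc2
--     dx, dy = x2-x1, y2-y1
--
--     if dx == 0:
--         if dy > 0:
--             return [(x1, y1+d+1) for d in range(dy)]
--         return [(x1, y1-d-1) for d in range(-dy)]
--     elif dy == 0:
--         if dx > 0:
--             return [(x1+d+1, y1) for d in range(dx)]
--         return [(x1-d-1, y1) for d in range(-dx)]
--     else:
--         diff = abs(dx)
--         if dx>0 and dy>0:
--             return [(x1+d+1, y1+d+1) for d in range(diff)]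
--         elif dx>0:
--             return [(x1+d+1, y1-d-1) for d in range(diff)]
--         elif dy>0:
--             return [(x1-d-1, y1+d+1) for d in range(diff)]
--         return [(x1-d-1, y1-d-1) for d in range(diff)]
--
-- def check_move(move, pieces):
--     x1, y1 = move[0]
--     x2, y2 = move[1]
--
--     if x1 == x2 or y1 == y2 or abs(x2-x1) == abs(y2-y1):
--         squares = squares_between(move[0], move[1])[:-1]
--         for square in squares:
--             if square in pieces[0] or square in pieces[1]:
--                 return False
--         return True
--     return False
-- ===== SOURCE B (Python) =====
-- def check_move(move, pieces):
--     (x1, y1), (x2, y2) = move[0], move[1]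
--     dx, dy = x2 - x1, y2 - y1
--     if dx != 0 and dy != 0 and abs(dx) != abs(dy):
--         return False
--     sx = (dx > 0) - (dx < 0)
--     sy = (dy > 0) - (dy < 0)
--     n = max(abs(dx), abs(dy))
--     for side in (pieces[0], pieces[1]):
--         for (px, py) in side:
--             k = (px - x1) * sx if sx != 0 else (py - y1) * sy
--             if 1 <= k <= n - 1 and px == x1 + k * sx and py == y1 + k * sy:
--                 return False
--     return True
-- ===== Notes on version B (the rewrite author's own statement) =====
-- stated objective: alternative
-- what changed: Inverts the traversal: instead of enumerating every square of the path and testing each against the piece lists, B never builds the path at all - it iterates over the pieces once and decides with an O(1) arithmetic betweenness test (k = signed offset along the move direction, 1 <= k <= n-1 and both coordinates consistent) whether that piece blocks the move.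
-- outside the precondition, e.g. on check_move([(0, 0), (0, 1)], []): A returns True, B raises IndexError
import Mathlib
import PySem

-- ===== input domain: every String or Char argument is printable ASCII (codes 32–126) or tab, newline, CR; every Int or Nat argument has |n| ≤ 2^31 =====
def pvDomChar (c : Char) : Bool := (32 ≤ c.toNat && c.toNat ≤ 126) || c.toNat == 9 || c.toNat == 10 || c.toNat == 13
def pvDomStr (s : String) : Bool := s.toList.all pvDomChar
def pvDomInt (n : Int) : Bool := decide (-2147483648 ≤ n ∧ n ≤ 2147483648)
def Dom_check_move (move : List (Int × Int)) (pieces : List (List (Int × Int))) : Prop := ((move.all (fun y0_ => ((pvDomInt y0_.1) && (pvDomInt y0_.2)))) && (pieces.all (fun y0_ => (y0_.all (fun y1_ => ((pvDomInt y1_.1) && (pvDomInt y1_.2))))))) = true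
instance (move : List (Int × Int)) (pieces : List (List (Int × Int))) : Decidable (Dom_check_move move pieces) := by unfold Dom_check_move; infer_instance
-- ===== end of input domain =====

-- B inverts the traversal: it never enumerates the path squares; it scans the two piece
-- lists once and decides blocking with an arithmetic betweenness test (objective: alternative).


-- ===== PORT A =====
def squares_between (loc1 loc2 : Int × Int) : List (Int × Int) :=
  let x1 := loc1.1; let y1 := loc1.2
  let x2 := loc2.1; let y2 := loc2.2
  let dx := x2 - x1; let dy := y2 - y1
  if dx = 0 then
    if dy > 0 then (PySem.List.pyRange 0 dy 1).map (fun d => (x1, y1 + d + 1))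
    else (PySem.List.pyRange 0 (-dy) 1).map (fun d => (x1, y1 - d - 1))
  else if dy = 0 then
    if dx > 0 then (PySem.List.pyRange 0 dx 1).map (fun d => (x1 + d + 1, y1))
    else (PySem.List.pyRange 0 (-dx) 1).map (fun d => (x1 - d - 1, y1))
  else
    let diff := |dx|
    if dx > 0 ∧ dy > 0 then (PySem.List.pyRange 0 diff 1).map (fun d => (x1 + d + 1, y1 + d + 1))
    else if dx > 0 then (PySem.List.pyRange 0 diff 1).map (fun d => (x1 + d + 1, y1 - d - 1))
    else if dy > 0 then (PySem.List.pyRange 0 diff 1).map (fun d => (x1 - d - 1, y1 + d + 1))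
    else (PySem.List.pyRange 0 diff 1).map (fun d => (x1 - d - 1, y1 - d - 1))

def check_move (move : List (Int × Int)) (pieces : List (List (Int × Int))) : Bool :=
  let m0 := PySem.List.pyGetD move 0 (0, 0)
  let m1 := PySem.List.pyGetD move 1 (0, 0)
  if m0.1 = m1.1 ∨ m0.2 = m1.2 ∨ |m1.1 - m0.1| = |m1.2 - m0.2| then
    let squares := PySem.List.slice (squares_between m0 m1) none (some (-1))
    let p0 := PySem.List.pyGetD pieces 0 []
    let p1 := PySem.List.pyGetD pieces 1 []
    -- 'for square in squares: if occupied: return False / return True' = all squares unoccupied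
    squares.all (fun s => !(p0.contains s || p1.contains s))
  else false

-- ===== PORT B =====
-- Source B's inner test: does piece p block the move?  k = signed offset along the step direction
def cmBlocks (x1 y1 sx sy n : Int) (p : Int × Int) : Bool :=
  let k := if sx ≠ 0 then (p.1 - x1) * sx else (p.2 - y1) * sy
  decide (1 ≤ k ∧ k ≤ n - 1 ∧ p.1 = x1 + k * sx ∧ p.2 = y1 + k * sy)

def cmStep (d : Int) : Int := (if d > 0 then 1 else 0) - (if d < 0 then 1 else 0)

def check_move_alt (move : List (Int × Int)) (pieces : List (List (Int × Int))) : Bool :=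
  let m0 := PySem.List.pyGetD move 0 (0, 0)
  let m1 := PySem.List.pyGetD move 1 (0, 0)
  let dx := m1.1 - m0.1
  let dy := m1.2 - m0.2
  if dx ≠ 0 ∧ dy ≠ 0 ∧ |dx| ≠ |dy| then false
  else
    let sx := cmStep dx
    let sy := cmStep dy
    let n := max |dx| |dy|
    -- 'for side in (pieces[0], pieces[1]): for p in side: if blocks: return False / return True'
    !((PySem.List.pyGetD pieces 0 []).any (cmBlocks m0.1 m0.2 sx sy n)
      || (PySem.List.pyGetD pieces 1 []).any (cmBlocks m0.1 m0.2 sx sy n))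

-- ===== PRECONDITION & SPEC =====
-- Pre_ requires at least two move squares and two piece lists: B reads pieces[0] and pieces[1]
-- unconditionally once the line guard passes, while A reaches them only when an intermediate
-- square exists (so A can return on shorter pieces lists where B raises IndexError).
def Pre_check_move (move : List (Int × Int)) (pieces : List (List (Int × Int))) : Prop :=
  2 ≤ move.length ∧ 2 ≤ pieces.length
instance (move : List (Int × Int)) (pieces : List (List (Int × Int))) : Decidable (Pre_check_move move pieces) := by unfold Pre_check_move; infer_instance

def pvWitness_check_move : (List (Int × Int)) × (List (List (Int × Int))) :=
  ([(0, 0), (3, 3)], [[(1, 1)], [(5, 5)]])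

def Spec_check_move (move : List (Int × Int)) (pieces : List (List (Int × Int))) (out : Bool) : Prop := out = check_move_alt move pieces
instance (move : List (Int × Int)) (pieces : List (List (Int × Int))) (out : Bool) : Decidable (Spec_check_move move pieces out) := by unfold Spec_check_move; infer_instance

-- ===== CLAIM (what is proved, stated in full; the proofs are below) =====
def Claim_equal_check_move : Prop := ∀ (move : List (Int × Int)) (pieces : List (List (Int × Int))), Dom_check_move move pieces → Pre_check_move move pieces → Spec_check_move move pieces (check_move move pieces)

-- ===== LEMMAS AND PROOFS =====

-- the intermediate squares of a move in step form: the proof-side normal form for A's path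
def pathList (x1 y1 sx sy : Int) (m : Nat) : List (Int × Int) :=
  (List.range m).map (fun k : Nat => (x1 + ((k : Int) + 1) * sx, y1 + ((k : Int) + 1) * sy))

lemma slice_map_pyRange (M x1 y1 sx sy : Int) (f : Int → Int × Int)
    (hf : ∀ d : Int, f d = (x1 + (d + 1) * sx, y1 + (d + 1) * sy)) :
    PySem.List.slice ((PySem.List.pyRange 0 M 1).map f) none (some (-1))
      = pathList x1 y1 sx sy (M.toNat - 1) := by
  rw [PySem.List.slice_to_neg_one, PySem.List.pyRange_one]
  simp only [zero_add, sub_zero, List.map_map, List.dropLast_eq_take, List.length_map,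
    List.length_range, ← List.map_take, List.take_range]
  rw [min_eq_left (by omega)]
  apply List.ext_getElem
  · simp [pathList]
  · intro i h1 h2
    simp only [List.getElem_map, Function.comp_apply, List.getElem_range, pathList, hf]

-- swap of quantifiers: "every path square misses both piece lists" = "no piece blocks the path"
lemma cm_swap (sq p0 p1 : List (Int × Int)) (blk : Int × Int → Bool)
    (h : ∀ p, blk p = sq.contains p) :
    sq.all (fun s => !(p0.contains s || p1.contains s)) = !(p0.any blk || p1.any blk) := by
  have hb : blk = fun p => sq.contains p := funext h
  subst hb
  rw [Bool.eq_iff_iff]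
  simp [List.all_eq_true]
  aesop

-- B's betweenness test characterises membership in A's path, for every unit step direction
lemma blk_eq_contains (x1 y1 sx sy n : Int) (m : Nat) (p : Int × Int)
    (hm : (m : Int) = n - 1)
    (hs : (sx = 0 ∧ sy = 1) ∨ (sx = 0 ∧ sy = -1) ∨ (sx = 1 ∧ sy = 0) ∨ (sx = -1 ∧ sy = 0) ∨
          (sx = 1 ∧ sy = 1) ∨ (sx = 1 ∧ sy = -1) ∨ (sx = -1 ∧ sy = 1) ∨ (sx = -1 ∧ sy = -1)) :
    cmBlocks x1 y1 sx sy n p = (pathList x1 y1 sx sy m).contains p := by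
  obtain ⟨px, py⟩ := p
  rw [Bool.eq_iff_iff]
  rcases hs with ⟨hx, hy⟩ | ⟨hx, hy⟩ | ⟨hx, hy⟩ | ⟨hx, hy⟩ | ⟨hx, hy⟩ | ⟨hx, hy⟩ | ⟨hx, hy⟩ | ⟨hx, hy⟩ <;>
    subst hx hy <;>
    norm_num [cmBlocks, pathList, List.contains_iff_mem, List.mem_map, List.mem_range,
      Prod.mk.injEq] <;>
    constructor
  · rintro ⟨h1, h2, h3⟩; exact ⟨(py - y1 - 1).toNat, by omega, by omega, by omega⟩
  · rintro ⟨j, hj, e1, e2⟩; omega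
  · rintro ⟨h1, h2, h3⟩; exact ⟨(y1 - py - 1).toNat, by omega, by omega, by omega⟩
  · rintro ⟨j, hj, e1, e2⟩; omega
  · rintro ⟨h1, h2, h3⟩; exact ⟨(px - x1 - 1).toNat, by omega, by omega, by omega⟩
  · rintro ⟨j, hj, e1, e2⟩; omega
  · rintro ⟨h1, h2, h3⟩; exact ⟨(x1 - px - 1).toNat, by omega, by omega, by omega⟩
  · rintro ⟨j, hj, e1, e2⟩; omega
  · rintro ⟨h1, h2, h3⟩; exact ⟨(px - x1 - 1).toNat, by omega, by omega, by omega⟩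
  · rintro ⟨j, hj, e1, e2⟩; omega
  · rintro ⟨h1, h2, h3⟩; exact ⟨(px - x1 - 1).toNat, by omega, by omega, by omega⟩
  · rintro ⟨j, hj, e1, e2⟩; omega
  · rintro ⟨h1, h2, h3⟩; exact ⟨(x1 - px - 1).toNat, by omega, by omega, by omega⟩
  · rintro ⟨j, hj, e1, e2⟩; omega
  · rintro ⟨h1, h2, h3⟩; exact ⟨(x1 - px - 1).toNat, by omega, by omega, by omega⟩
  · rintro ⟨j, hj, e1, e2⟩; omega

lemma cm_body_eq (x1 y1 x2 y2 : Int) (p0 p1 : List (Int × Int))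
    (mt : List (Int × Int)) (pt : List (List (Int × Int))) :
    check_move ((x1, y1) :: (x2, y2) :: mt) (p0 :: p1 :: pt)
      = check_move_alt ((x1, y1) :: (x2, y2) :: mt) (p0 :: p1 :: pt) := by
  simp only [check_move, check_move_alt, PySem.List.pyGetD_ofNat',
    List.getD_cons_zero, List.getD_cons_succ]
  by_cases hg : x1 = x2 ∨ y1 = y2 ∨ |x2 - x1| = |y2 - y1|
  case neg =>
    have hg' : x2 - x1 ≠ 0 ∧ y2 - y1 ≠ 0 ∧ |x2 - x1| ≠ |y2 - y1| := by
      have h3 : ¬ |x2 - x1| = |y2 - y1| := fun h => hg (Or.inr (Or.inr h))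
      exact ⟨by omega, by omega, h3⟩
    rw [if_neg hg, if_pos hg']
  case pos =>
    have hg' : ¬(x2 - x1 ≠ 0 ∧ y2 - y1 ≠ 0 ∧ |x2 - x1| ≠ |y2 - y1|) := by
      rcases hg with h | h | h
      · rintro ⟨h1, -, -⟩; omega
      · rintro ⟨-, h2, -⟩; omega
      · rintro ⟨-, -, h3⟩; exact h3 h
    rw [if_pos hg, if_neg hg']
    rcases lt_trichotomy (x2 - x1) 0 with hdx | hdx | hdx
    · -- dx < 0
      have hsx : cmStep (x2 - x1) = -1 := by
        unfold cmStep; rw [if_neg (by omega), if_pos hdx]; norm_num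
      rcases lt_trichotomy (y2 - y1) 0 with hdy | hdy | hdy
      · -- dy < 0 : down-left diagonal
        have habs : |x2 - x1| = |y2 - y1| := by
          rcases hg with h | h | h
          · omega
          · omega
          · exact h
        have hsy : cmStep (y2 - y1) = -1 := by
          unfold cmStep; rw [if_neg (by omega), if_pos hdy]; norm_num
        have hsb : squares_between (x1, y1) (x2, y2)
            = (PySem.List.pyRange 0 |x2 - x1| 1).map (fun d => (x1 - d - 1, y1 - d - 1)) := by
          simp only [squares_between]
          rw [if_neg (by omega), if_neg (by omega), if_neg (by rintro ⟨h, -⟩; omega),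
            if_neg (by omega), if_neg (by omega)]
        have hn : max |x2 - x1| |y2 - y1| = |x2 - x1| := by
          rw [habs, max_self]
        rw [hsb, slice_map_pyRange |x2 - x1| x1 y1 (-1) (-1) _
          (by intro d; simp only [Prod.mk.injEq]; constructor <;> ring), hsx, hsy, hn]
        exact cm_swap _ p0 p1 _ (fun p =>
          blk_eq_contains x1 y1 (-1) (-1) |x2 - x1| _ p
            (by rw [abs_of_neg (by omega)]; omega) (by norm_num))
      · -- dy = 0 : left
        have hsy : cmStep (y2 - y1) = 0 := by rw [hdy]; decide
        have hsb : squares_between (x1, y1) (x2, y2)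
            = (PySem.List.pyRange 0 (-(x2 - x1)) 1).map (fun d => (x1 - d - 1, y1)) := by
          simp only [squares_between]
          rw [if_neg (by omega), if_pos hdy, if_neg (by omega)]
        have hn : max |x2 - x1| |y2 - y1| = -(x2 - x1) := by
          rw [hdy, abs_zero, abs_of_neg (show x2 - x1 < 0 by omega)]
          exact max_eq_left (by omega)
        rw [hsb, slice_map_pyRange (-(x2 - x1)) x1 y1 (-1) 0 _
          (by intro d; simp only [Prod.mk.injEq]; constructor <;> ring), hsx, hsy, hn]
        exact cm_swap _ p0 p1 _ (fun p =>
          blk_eq_contains x1 y1 (-1) 0 (-(x2 - x1)) _ p (by omega) (by norm_num))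
      · -- dy > 0 : up-left diagonal
        have habs : |x2 - x1| = |y2 - y1| := by
          rcases hg with h | h | h
          · omega
          · omega
          · exact h
        have hsy : cmStep (y2 - y1) = 1 := by
          unfold cmStep; rw [if_pos hdy, if_neg (by omega)]; norm_num
        have hsb : squares_between (x1, y1) (x2, y2)
            = (PySem.List.pyRange 0 |x2 - x1| 1).map (fun d => (x1 - d - 1, y1 + d + 1)) := by
          simp only [squares_between]
          rw [if_neg (by omega), if_neg (by omega), if_neg (by rintro ⟨h, -⟩; omega),
            if_neg (by omega), if_pos hdy]
        have hn : max |x2 - x1| |y2 - y1| = |x2 - x1| := by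
          rw [habs, max_self]
        rw [hsb, slice_map_pyRange |x2 - x1| x1 y1 (-1) 1 _
          (by intro d; simp only [Prod.mk.injEq]; constructor <;> ring), hsx, hsy, hn]
        exact cm_swap _ p0 p1 _ (fun p =>
          blk_eq_contains x1 y1 (-1) 1 |x2 - x1| _ p
            (by rw [abs_of_neg (by omega)]; omega) (by norm_num))
    · -- dx = 0
      have hsx : cmStep (x2 - x1) = 0 := by rw [hdx]; decide
      rcases lt_trichotomy (y2 - y1) 0 with hdy | hdy | hdy
      · -- dy < 0 : down
        have hsy : cmStep (y2 - y1) = -1 := by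
          unfold cmStep; rw [if_neg (by omega), if_pos hdy]; norm_num
        have hsb : squares_between (x1, y1) (x2, y2)
            = (PySem.List.pyRange 0 (-(y2 - y1)) 1).map (fun d => (x1, y1 - d - 1)) := by
          simp only [squares_between]
          rw [if_pos hdx, if_neg (by omega)]
        have hn : max |x2 - x1| |y2 - y1| = -(y2 - y1) := by
          rw [hdx, abs_zero, abs_of_neg (show y2 - y1 < 0 by omega)]
          exact max_eq_right (by omega)
        rw [hsb, slice_map_pyRange (-(y2 - y1)) x1 y1 0 (-1) _
          (by intro d; simp only [Prod.mk.injEq]; constructor <;> ring), hsx, hsy, hn]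
        exact cm_swap _ p0 p1 _ (fun p =>
          blk_eq_contains x1 y1 0 (-1) (-(y2 - y1)) _ p (by omega) (by norm_num))
      · -- dy = 0 too: no intermediate squares, no blocking piece possible
        have hsy : cmStep (y2 - y1) = 0 := by rw [hdy]; decide
        have hblk : (cmBlocks x1 y1 (cmStep (x2 - x1)) (cmStep (y2 - y1))
            (max |x2 - x1| |y2 - y1|)) = fun _ => false := by
          funext p
          rw [hsx, hsy]
          simp [cmBlocks]
        rw [hblk]
        simp only [squares_between, hdx, hdy]
        norm_num [PySem.List.pyRange_zero, PySem.List.slice_to_neg_one]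
      · -- dy > 0 : up
        have hsy : cmStep (y2 - y1) = 1 := by
          unfold cmStep; rw [if_pos hdy, if_neg (by omega)]; norm_num
        have hsb : squares_between (x1, y1) (x2, y2)
            = (PySem.List.pyRange 0 (y2 - y1) 1).map (fun d => (x1, y1 + d + 1)) := by
          simp only [squares_between]
          rw [if_pos hdx, if_pos hdy]
        have hn : max |x2 - x1| |y2 - y1| = y2 - y1 := by
          rw [hdx, abs_zero, abs_of_pos (show (0:Int) < y2 - y1 by omega)]
          exact max_eq_right (by omega)
        rw [hsb, slice_map_pyRange (y2 - y1) x1 y1 0 1 _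
          (by intro d; simp only [Prod.mk.injEq]; constructor <;> ring), hsx, hsy, hn]
        exact cm_swap _ p0 p1 _ (fun p =>
          blk_eq_contains x1 y1 0 1 (y2 - y1) _ p (by omega) (by norm_num))
    · -- dx > 0
      have hsx : cmStep (x2 - x1) = 1 := by
        unfold cmStep; rw [if_pos hdx, if_neg (by omega)]; norm_num
      rcases lt_trichotomy (y2 - y1) 0 with hdy | hdy | hdy
      · -- dy < 0 : down-right diagonal
        have habs : |x2 - x1| = |y2 - y1| := by
          rcases hg with h | h | h
          · omega
          · omega
          · exact h
        have hsy : cmStep (y2 - y1) = -1 := by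
          unfold cmStep; rw [if_neg (by omega), if_pos hdy]; norm_num
        have hsb : squares_between (x1, y1) (x2, y2)
            = (PySem.List.pyRange 0 |x2 - x1| 1).map (fun d => (x1 + d + 1, y1 - d - 1)) := by
          simp only [squares_between]
          rw [if_neg (by omega), if_neg (by omega), if_neg (by rintro ⟨-, h⟩; omega),
            if_pos hdx]
        have hn : max |x2 - x1| |y2 - y1| = |x2 - x1| := by
          rw [habs, max_self]
        rw [hsb, slice_map_pyRange |x2 - x1| x1 y1 1 (-1) _
          (by intro d; simp only [Prod.mk.injEq]; constructor <;> ring), hsx, hsy, hn]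
        exact cm_swap _ p0 p1 _ (fun p =>
          blk_eq_contains x1 y1 1 (-1) |x2 - x1| _ p
            (by rw [abs_of_pos (by omega)]; omega) (by norm_num))
      · -- dy = 0 : right
        have hsy : cmStep (y2 - y1) = 0 := by rw [hdy]; decide
        have hsb : squares_between (x1, y1) (x2, y2)
            = (PySem.List.pyRange 0 (x2 - x1) 1).map (fun d => (x1 + d + 1, y1)) := by
          simp only [squares_between]
          rw [if_neg (by omega), if_pos hdy, if_pos hdx]
        have hn : max |x2 - x1| |y2 - y1| = x2 - x1 := by
          rw [hdy, abs_zero, abs_of_pos (show (0:Int) < x2 - x1 by omega)]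
          exact max_eq_left (by omega)
        rw [hsb, slice_map_pyRange (x2 - x1) x1 y1 1 0 _
          (by intro d; simp only [Prod.mk.injEq]; constructor <;> ring), hsx, hsy, hn]
        exact cm_swap _ p0 p1 _ (fun p =>
          blk_eq_contains x1 y1 1 0 (x2 - x1) _ p (by omega) (by norm_num))
      · -- dy > 0 : up-right diagonal
        have habs : |x2 - x1| = |y2 - y1| := by
          rcases hg with h | h | h
          · omega
          · omega
          · exact h
        have hsy : cmStep (y2 - y1) = 1 := by
          unfold cmStep; rw [if_pos hdy, if_neg (by omega)]; norm_num
        have hsb : squares_between (x1, y1) (x2, y2)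
            = (PySem.List.pyRange 0 |x2 - x1| 1).map (fun d => (x1 + d + 1, y1 + d + 1)) := by
          simp only [squares_between]
          rw [if_neg (by omega), if_neg (by omega), if_pos ⟨hdx, hdy⟩]
        have hn : max |x2 - x1| |y2 - y1| = |x2 - x1| := by
          rw [habs, max_self]
        rw [hsb, slice_map_pyRange |x2 - x1| x1 y1 1 1 _
          (by intro d; simp only [Prod.mk.injEq]; constructor <;> ring), hsx, hsy, hn]
        exact cm_swap _ p0 p1 _ (fun p =>
          blk_eq_contains x1 y1 1 1 |x2 - x1| _ p
            (by rw [abs_of_pos (by omega)]; omega) (by norm_num))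

-- ===== VERDICT (by name: the statement is the Claim_ definition above) =====
theorem check_move_spec : Claim_equal_check_move := by
  intro move pieces _ hpre
  obtain ⟨hm, hp⟩ := hpre
  match move, pieces with
  | (x1, y1) :: (x2, y2) :: mt, p0 :: p1 :: pt =>
    exact cm_body_eq x1 y1 x2 y2 p0 p1 mt pt
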